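-- pv_equiv track=rewrite | github.com/AlexandreD13/AoC_2021 | day3/day3_helpers.py | one_vs_zero
-- ===== SOURCE A (Python) =====
-- def one_vs_zero(gas_list, j):
--     ones = 0
--     zeros = 0
--     for i in range(len(gas_list)):
--         if gas_list[i][j] == "1":
--             ones += 1
--         else:
--             zeros += 1
--     return ones, zeros
-- ===== SOURCE B (Python) =====
-- def one_vs_zero(gas_list, j):
--     if not gas_list:
--         return 0, 0
--     if len(gas_list) == 1:
--         return (1, 0) if gas_list[0][j] == "1" else (0, 1)
--     mid = len(gas_list) // 2
--     o1, z1 = one_vs_zero(gas_list[:mid], j)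
--     o2, z2 = one_vs_zero(gas_list[mid:], j)
--     return o1 + o2, z1 + z2
-- ===== Notes on version B (the rewrite author's own statement) =====
-- stated objective: alternative
-- what changed: B replaces A's single indexed loop with two running counters by a divide-and-conquer recursion: split the list in half, recursively compute each half's (ones, zeros) pair, and add the pairs componentwise.
import Mathlib
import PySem

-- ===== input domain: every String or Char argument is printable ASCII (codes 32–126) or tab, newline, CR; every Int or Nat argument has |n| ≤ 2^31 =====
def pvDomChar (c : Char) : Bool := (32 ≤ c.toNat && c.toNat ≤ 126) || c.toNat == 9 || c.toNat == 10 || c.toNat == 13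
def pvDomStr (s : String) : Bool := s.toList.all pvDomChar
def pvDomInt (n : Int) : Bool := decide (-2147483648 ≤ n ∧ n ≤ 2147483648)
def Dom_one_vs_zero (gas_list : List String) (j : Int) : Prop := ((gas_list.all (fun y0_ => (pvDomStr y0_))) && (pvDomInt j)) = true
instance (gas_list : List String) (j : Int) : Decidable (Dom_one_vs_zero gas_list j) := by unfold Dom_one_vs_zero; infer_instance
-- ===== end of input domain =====

-- B replaces A's indexed loop with two tallies by a divide-and-conquer recursion
-- that splits the list in half and adds the halves' pairs (objective: alternative).

-- ===== PORT A =====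
-- A: indexed loop over range(len(gas_list)) maintaining the pair (ones, zeros).
def one_vs_zero (gas_list : List String) (j : Int) : Int × Int :=
  (PySem.List.pyRange 0 gas_list.length 1).foldl
    (fun (acc : Int × Int) i =>
      if PySem.Str.pyGet? (PySem.List.pyGetD gas_list i "") j = some '1'
      then (acc.1 + 1, acc.2)
      else (acc.1, acc.2 + 1))
    (0, 0)

-- ===== PORT B =====
-- B: split in half, recurse on both halves, add the pairs.
-- gas_list[:mid] / gas_list[mid:] with 0 ≤ mid ≤ len are exactly take/drop.
def one_vs_zero_alt (gas_list : List String) (j : Int) : Int × Int :=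
  match gas_list with
  | [] => (0, 0)
  | [s] => if PySem.Str.pyGet? s j = some '1' then (1, 0) else (0, 1)
  | a :: b :: t =>
    let l := a :: b :: t
    let mid := l.length / 2
    let p1 := one_vs_zero_alt (l.take mid) j
    let p2 := one_vs_zero_alt (l.drop mid) j
    (p1.1 + p2.1, p1.2 + p2.2)
termination_by gas_list.length
decreasing_by
  · simp [List.length_take]; omega
  · simp; omega

-- ===== PRECONDITION & SPEC =====
-- Pre_ excludes exactly the inputs where Python A raises IndexError: j must be a
-- valid Python index into every row of gas_list.
def Pre_one_vs_zero (gas_list : List String) (j : Int) : Prop :=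
  ∀ s ∈ gas_list, PySem.Raise.InRange s.toList.length j
instance (gas_list : List String) (j : Int) : Decidable (Pre_one_vs_zero gas_list j) := by unfold Pre_one_vs_zero; infer_instance
def pvWitness_one_vs_zero : List String × Int := (["101", "010", "111"], 1)

def Spec_one_vs_zero (gas_list : List String) (j : Int) (out : Int × Int) : Prop := out = one_vs_zero_alt gas_list j
instance (gas_list : List String) (j : Int) (out : Int × Int) : Decidable (Spec_one_vs_zero gas_list j out) := by unfold Spec_one_vs_zero; infer_instance

-- ===== CLAIM (what is proved, stated in full; the proofs are below) =====
def Claim_equal_one_vs_zero : Prop := ∀ (gas_list : List String) (j : Int), Dom_one_vs_zero gas_list j → Pre_one_vs_zero gas_list j → Spec_one_vs_zero gas_list j (one_vs_zero gas_list j)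

-- ===== LEMMAS AND PROOFS =====

-- A's fold, started at any accumulator, adds countP to the first component and
-- (length - countP) to the second.
theorem one_vs_zero_fold (j : Int) (l : List String) (o z : Int) :
    l.foldl
      (fun (acc : Int × Int) s =>
        if PySem.Str.pyGet? s j = some '1'
        then (acc.1 + 1, acc.2)
        else (acc.1, acc.2 + 1))
      (o, z)
    = (o + (l.countP (fun row => PySem.Str.pyGet? row j = some '1') : Int),
       z + ((l.length : Int) - (l.countP (fun row => PySem.Str.pyGet? row j = some '1') : Int))) := by
  induction l generalizing o z with
  | nil => simp
  | cons s t ih =>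
    simp only [List.foldl_cons, List.countP_cons, List.length_cons]
    by_cases h : PySem.Str.pyGet? s j = some '1'
    · rw [if_pos h, ih]
      simp only [h, decide_true, Prod.mk.injEq]
      constructor <;> push_cast <;> ring
    · rw [if_neg h, ih]
      simp only [h, decide_false, Prod.mk.injEq]
      constructor <;> push_cast <;> ring

-- B's divide-and-conquer also computes (countP, length - countP).
theorem one_vs_zero_alt_eq (gas_list : List String) (j : Int) :
    one_vs_zero_alt gas_list j
    = ((gas_list.countP (fun row => PySem.Str.pyGet? row j = some '1') : Int),
       (gas_list.length : Int) - (gas_list.countP (fun row => PySem.Str.pyGet? row j = some '1') : Int)) := by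
  induction gas_list using one_vs_zero_alt.induct j with
  | case1 => simp [one_vs_zero_alt]
  | case2 s h =>
    rw [one_vs_zero_alt]
    split <;> simp_all
  | case3 s h =>
    rw [one_vs_zero_alt]
    split <;> simp_all
  | case4 a b t l mid ih1 ih2 =>
    rw [one_vs_zero_alt]
    have ihA :
        one_vs_zero_alt (List.take ((a :: b :: t).length / 2) (a :: b :: t)) j =
          ((List.countP (fun row => decide (PySem.Str.pyGet? row j = some '1')) (List.take ((a :: b :: t).length / 2) (a :: b :: t)) : Int),
            ((List.take ((a :: b :: t).length / 2) (a :: b :: t)).length : Int) -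
              (List.countP (fun row => decide (PySem.Str.pyGet? row j = some '1')) (List.take ((a :: b :: t).length / 2) (a :: b :: t)) : Int)) := ih1
    have ihB :
        one_vs_zero_alt (List.drop ((a :: b :: t).length / 2) (a :: b :: t)) j =
          ((List.countP (fun row => decide (PySem.Str.pyGet? row j = some '1')) (List.drop ((a :: b :: t).length / 2) (a :: b :: t)) : Int),
            ((List.drop ((a :: b :: t).length / 2) (a :: b :: t)).length : Int) -
              (List.countP (fun row => decide (PySem.Str.pyGet? row j = some '1')) (List.drop ((a :: b :: t).length / 2) (a :: b :: t)) : Int)) := ih2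
    rw [ihA, ihB]
    have hld := List.take_append_drop ((a :: b :: t).length / 2) (a :: b :: t)
    have hc : (a :: b :: t).countP (fun row => decide (PySem.Str.pyGet? row j = some '1'))
        = ((a :: b :: t).take ((a :: b :: t).length / 2)).countP (fun row => decide (PySem.Str.pyGet? row j = some '1'))
          + ((a :: b :: t).drop ((a :: b :: t).length / 2)).countP (fun row => decide (PySem.Str.pyGet? row j = some '1')) := by
      conv_lhs => rw [← hld]
      rw [List.countP_append]
    have hl : (a :: b :: t).length = ((a :: b :: t).take ((a :: b :: t).length / 2)).length + ((a :: b :: t).drop ((a :: b :: t).length / 2)).length := by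
      conv_lhs => rw [← hld]
      rw [List.length_append]
    simp only [Prod.mk.injEq]
    constructor
    · omega
    · omega

-- ===== VERDICT (by name: the statement is the Claim_ definition above) =====
theorem one_vs_zero_spec : Claim_equal_one_vs_zero := by
  intro gas_list j _ _
  unfold Spec_one_vs_zero one_vs_zero
  rw [PySem.List.foldl_pyRange_zero_pyGetD' gas_list ""
      (fun (acc : Int × Int) s =>
        if PySem.Str.pyGet? s j = some '1'
        then (acc.1 + 1, acc.2)
        else (acc.1, acc.2 + 1)) ((0 : Int), (0 : Int))]
  rw [one_vs_zero_fold, one_vs_zero_alt_eq]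
  simp
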